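-- pv_equiv track=rewrite | github.com/JQueimado/Universidade | Entropia.py | entropia1
-- ===== SOURCE A (Python) =====
-- def entropia1(ff):
--
--     counter1 = 0
--     counter = 0
--
--     for i in ff:
--
--         counter += 1
--
--         if i == '1':
--
--             counter1 += 1
--
--     return counter1 ,counter
-- ===== SOURCE B (Python) =====
-- def entropia1(ff):
--     lst = list(ff)
--
--     def go(lo, hi):
--         # divide and conquer over the index range [lo, hi)
--         if hi - lo == 0:
--             return 0, 0
--         if hi - lo == 1:
--             return (1 if lst[lo] == '1' else 0), 1
--         mid = (lo + hi) // 2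
--         a1, at = go(lo, mid)
--         b1, bt = go(mid, hi)
--         return a1 + b1, at + bt
--
--     return go(0, len(lst))
-- ===== Notes on version B (the rewrite author's own statement) =====
-- stated objective: alternative
-- what changed: Replaced the single linear pass with two running counters by a divide-and-conquer recursion that splits the index range in half, counts the '1's and the length of each half independently, and combines the pairs by component-wise addition.
import Mathlib
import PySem

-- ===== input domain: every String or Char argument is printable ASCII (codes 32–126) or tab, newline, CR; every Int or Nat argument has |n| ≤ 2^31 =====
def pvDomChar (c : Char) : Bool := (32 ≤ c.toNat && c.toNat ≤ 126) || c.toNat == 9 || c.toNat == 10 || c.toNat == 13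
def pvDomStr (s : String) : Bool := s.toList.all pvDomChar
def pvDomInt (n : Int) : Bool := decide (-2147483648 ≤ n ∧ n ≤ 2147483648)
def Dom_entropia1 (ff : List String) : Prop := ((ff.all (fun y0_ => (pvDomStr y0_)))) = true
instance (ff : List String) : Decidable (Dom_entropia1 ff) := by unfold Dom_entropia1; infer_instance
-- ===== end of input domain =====

-- B replaces A's single linear pass with two running counters by a divide-and-conquer
-- recursion over index ranges that combines half-results by addition (alternative, same cost).

-- ===== PORT A =====
-- literal port of A: two accumulators updated per element, in A's order
def entropia1 (ff : List String) : Int × Int :=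
  let p := ff.foldl (fun (p : Int × Int) i =>
    let counter := p.2 + 1
    if i == "1" then (p.1 + 1, counter) else (p.1, counter)) (0, 0)
  (p.1, p.2)

-- ===== PORT B =====
-- port of Source B's inner go(lo, hi): divide and conquer over the index range [lo, hi).
-- indices are Nat (Source B only ever calls go with 0 ≤ lo ≤ hi ≤ len(lst), where Python's
-- ints and '//' coincide with Nat arithmetic); lst[lo] on the valid index lo is getD lo "".
def entropia1Go (lst : List String) (lo hi : Nat) : Int × Int :=
  if hi - lo = 0 then (0, 0)
  else if hi - lo = 1 then ((if lst.getD lo "" == "1" then 1 else 0), 1)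
  else
    let mid := (lo + hi) / 2
    let a := entropia1Go lst lo mid
    let b := entropia1Go lst mid hi
    (a.1 + b.1, a.2 + b.2)
termination_by hi - lo
decreasing_by
  · omega
  · omega

-- port of Source B: return go(0, len(lst))
def entropia1_alt (ff : List String) : Int × Int :=
  entropia1Go ff 0 ff.length

-- ===== PRECONDITION & SPEC =====
def Spec_entropia1 (ff : List String) (out : Int × Int) : Prop := out = entropia1_alt ff
instance (ff : List String) (out : Int × Int) : Decidable (Spec_entropia1 ff out) := by unfold Spec_entropia1; infer_instance

-- ===== CLAIM (what is proved, stated in full; the proofs are below) =====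
def Claim_equal_entropia1 : Prop := ∀ (ff : List String), Dom_entropia1 ff → Spec_entropia1 ff (entropia1 ff)

-- ===== LEMMAS AND PROOFS =====

theorem entropia1_foldl (ff : List String) (a b : Int) :
    ff.foldl (fun (p : Int × Int) i =>
      let counter := p.2 + 1
      if i == "1" then (p.1 + 1, counter) else (p.1, counter)) (a, b)
      = (a + ff.count "1", b + ff.length) := by
  induction ff generalizing a b with
  | nil => simp
  | cons x xs ih =>
    simp only [List.foldl_cons]
    by_cases hx : x == "1"
    · rw [if_pos hx, ih]
      simp only [beq_iff_eq] at hx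
      subst hx
      simp only [List.count_cons_self, List.length_cons, Prod.mk.injEq]
      push_cast
      constructor <;> ring
    · rw [if_neg hx, ih]
      simp only [beq_iff_eq] at hx
      rw [List.count_cons_of_ne hx]
      simp only [List.length_cons, Prod.mk.injEq]
      push_cast
      exact ⟨trivial, by ring⟩

-- the divide-and-conquer recursion computes the count of "1" and the length of slice [lo, hi)
theorem entropia1Go_spec (lst : List String) :
    ∀ n lo hi, hi - lo = n → hi ≤ lst.length →
      entropia1Go lst lo hi
        = ((((lst.drop lo).take (hi - lo)).count "1" : Int), ((hi - lo : Nat) : Int)) := by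
  intro n
  induction n using Nat.strong_induction_on with
  | _ n ih =>
    intro lo hi hn hhi
    rw [entropia1Go]
    by_cases h0 : hi - lo = 0
    · simp [h0]
    · rw [if_neg h0]
      by_cases h1 : hi - lo = 1
      · rw [if_pos h1, h1]
        have hlo : lo < lst.length := by omega
        have hget : lst.getD lo "" = lst[lo] := List.getD_eq_getElem lst "" hlo
        have htake : (lst.drop lo).take 1 = [lst[lo]] := by
          have : lst.drop lo = lst[lo] :: lst.drop (lo + 1) := List.drop_eq_getElem_cons hlo
          rw [this]; rfl
        rw [hget, htake]
        by_cases he : lst[lo] = "1"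
        · simp [he]
        · simp [he]
      · rw [if_neg h1]
        have hlt : lo < hi := by omega
        have hmidl : lo < (lo + hi) / 2 := by omega
        have hmidr : (lo + hi) / 2 < hi := by omega
        dsimp only
        rw [ih ((lo + hi) / 2 - lo) (by omega) lo ((lo + hi) / 2) rfl (by omega),
            ih (hi - (lo + hi) / 2) (by omega) ((lo + hi) / 2) hi rfl hhi]
        have hsplit : (lst.drop lo).take (hi - lo)
            = (lst.drop lo).take ((lo + hi) / 2 - lo)
              ++ (lst.drop ((lo + hi) / 2)).take (hi - (lo + hi) / 2) := by
          have harith : hi - lo = ((lo + hi) / 2 - lo) + (hi - (lo + hi) / 2) := by omega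
          rw [harith, List.take_add, List.drop_drop]
          have h2 : lo + ((lo + hi) / 2 - lo) = (lo + hi) / 2 := by omega
          rw [h2]
        rw [hsplit]
        simp only [List.count_append, Prod.mk.injEq]
        constructor
        · push_cast; ring
        · have harith : hi - lo = ((lo + hi) / 2 - lo) + (hi - (lo + hi) / 2) := by omega
          rw [harith]; push_cast; ring

-- ===== VERDICT (by name: the statement is the Claim_ definition above) =====
theorem entropia1_spec : Claim_equal_entropia1 := by
  intro ff _
  unfold Spec_entropia1 entropia1 entropia1_alt
  rw [entropia1Go_spec ff ff.length 0 ff.length rfl le_rfl, entropia1_foldl]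
  simp
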